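-- pv_equiv track=rewrite | github.com/savarin/bitpacker | src/bitpacker.py | reorder_pawn_positions
-- ===== SOURCE A (Python) =====
-- from typing import DefaultDict, List, Optional, Tuple
--
-- def reorder_pawn_positions(
--     pawn_positions: List[Tuple[int, str]],
--     promotions_by_piece: DefaultDict[str, List[Tuple[int, str]]],
--     is_white: bool,
-- ) -> Tuple[List[Tuple[int, str]], Optional[str]]:
--     """
--     Reorders positions in line with promotion convention P-N-B-R-Q.
--
--     For example, 7 pawns and 1 pawn promoted to queen will be denoted by the promotion key 00000004.
--     If there are no promotions, the promotion key is None.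
--     """
--     positions: List[Tuple[int, str]] = []
--     promotions_key = ""
--
--     promotion_map = {
--         "n": "1",
--         "b": "2",
--         "r": "3",
--         "q": "4",
--     }
--
--     positions += sorted(pawn_positions)
--     promotions_key += "0" * len(pawn_positions)
--
--     for piece, promoted_positions in sorted(
--         promotions_by_piece.items(), key=lambda x: promotion_map[x[0].lower()]
--     ):
--         if is_white != piece.isupper():
--             continue
--
--         positions += sorted(promoted_positions)
--         promotions_key += promotion_map[piece.lower()] * len(promoted_positions)
--
--     return (
--         positions,
--         promotions_key if len(promotions_key) > len(pawn_positions) else None,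
--     )
-- ===== SOURCE B (Python) =====
-- from typing import DefaultDict, List, Optional, Tuple
--
-- def reorder_pawn_positions(
--     pawn_positions: List[Tuple[int, str]],
--     promotions_by_piece: DefaultDict[str, List[Tuple[int, str]]],
--     is_white: bool,
-- ) -> Tuple[List[Tuple[int, str]], Optional[str]]:
--     """
--     Reorders positions in line with promotion convention P-N-B-R-Q.
--
--     Tags every position with its promotion digit ('0' for unpromoted pawns),
--     then orders the single tagged list with three stable passes (an LSD
--     radix-style sort on square-string, square-number, digit) and unzips it.
--     """
--     promotion_map = {
--         "n": "1",
--         "b": "2",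
--         "r": "3",
--         "q": "4",
--     }
--
--     tagged = [("0", pos) for pos in pawn_positions]
--     for piece, group in promotions_by_piece.items():
--         digit = promotion_map[piece.lower()]
--         if is_white == piece.isupper():
--             tagged += [(digit, pos) for pos in group]
--
--     tagged.sort(key=lambda t: t[1][1])
--     tagged.sort(key=lambda t: t[1][0])
--     tagged.sort(key=lambda t: t[0])
--
--     key = "".join(d for d, _ in tagged)
--     return [pos for _, pos in tagged], key if len(key) > len(pawn_positions) else None
-- ===== Notes on version B (the rewrite author's own statement) =====
-- stated objective: alternative
-- what changed: Instead of sorting the dict items by a key map and appending each surviving group pre-sorted, B tags every position with its promotion digit ('0' for pawns), orders the single tagged list with three stable sorting passes (LSD-radix style: square string, then square number, then digit) and unzips it into the positions and the key.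
import Mathlib
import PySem

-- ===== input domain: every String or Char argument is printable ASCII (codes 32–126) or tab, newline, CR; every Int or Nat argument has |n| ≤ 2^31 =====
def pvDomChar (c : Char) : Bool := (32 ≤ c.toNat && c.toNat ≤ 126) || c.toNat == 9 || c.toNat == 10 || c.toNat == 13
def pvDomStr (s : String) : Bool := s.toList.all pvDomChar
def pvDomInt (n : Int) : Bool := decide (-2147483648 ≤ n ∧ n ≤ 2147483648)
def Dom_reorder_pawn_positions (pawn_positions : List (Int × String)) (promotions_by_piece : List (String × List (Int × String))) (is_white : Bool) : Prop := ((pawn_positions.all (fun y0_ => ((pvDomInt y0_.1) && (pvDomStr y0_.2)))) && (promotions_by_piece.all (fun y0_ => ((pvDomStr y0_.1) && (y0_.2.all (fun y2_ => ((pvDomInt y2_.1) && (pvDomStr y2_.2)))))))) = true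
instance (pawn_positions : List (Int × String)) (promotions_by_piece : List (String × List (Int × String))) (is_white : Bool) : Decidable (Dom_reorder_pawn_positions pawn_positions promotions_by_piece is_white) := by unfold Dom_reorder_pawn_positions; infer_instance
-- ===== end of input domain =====

-- B tags every position with its promotion digit ('0' for pawns) and orders the single tagged
-- list by three stable sorting passes (LSD radix style: square string, square number, digit),
-- then unzips it, instead of A's sort-items-by-key-map plus per-group sorted appends (alternative
-- decomposition, similar cost); A = B is proved on every input where A does not raise KeyError.


-- shared helpers: both Pythons contain the same promotion_map dict (A reads it as chars of the
-- key string, B as the digit strings), compute promotion_map[piece.lower()], test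
-- piece.isupper() and sort position lists.

-- promotion_map lookup, value as the digit character (A-side)
def pvPmap (s : String) : Option Char :=
  if s = "n" then some '1'
  else if s = "b" then some '2'
  else if s = "r" then some '3'
  else if s = "q" then some '4'
  else none

-- promotion_map[piece.lower()]; Python raises KeyError when the lookup misses —
-- Pre_ excludes those inputs, so the default is never reached on admitted inputs
def pvOv (s : String) : Char := (pvPmap (PySem.Str.lower s)).getD ' '

-- promotion_map lookup, value as the digit string (B-side)
def pvPmapS (s : String) : Option String :=
  if s = "n" then some "1"
  else if s = "b" then some "2"
  else if s = "r" then some "3"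
  else if s = "q" then some "4"
  else none

-- B's promotion_map[piece.lower()] (same KeyError domain as pvOv; default never reached under Pre_)
def pvDigitS (s : String) : String := (pvPmapS (PySem.Str.lower s)).getD " "

-- piece.isupper(): some cased character and no lowercase one (exact on the ASCII domain Dom)
def pvIsupper (s : String) : Bool :=
  s.toList.any PySem.Chars.isupper && s.toList.all (fun c => !PySem.Chars.islower c)

-- sorted(list of (int, str) pairs) = sort by the tuple (fst, snd)
def pvSortPos (xs : List (Int × String)) : List (Int × String) :=
  PySem.List.sorted2 xs Prod.fst Prod.snd false

-- ===== PORT A =====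
def reorder_pawn_positions (pawn_positions : List (Int × String)) (promotions_by_piece : List (String × List (Int × String))) (is_white : Bool) : (List (Int × String)) × Option String :=
  -- promotions_by_piece is a Python dict: its .items() are the items of the built dict
  let items := (PySem.Dict.ofList promotions_by_piece).items
  let srt := PySem.List.sorted items (fun x => pvOv x.1) false
  let r := srt.foldl
    (fun (acc : List (Int × String) × List Char) it =>
      if is_white != pvIsupper it.1 then acc
      else (acc.1 ++ pvSortPos it.2, acc.2 ++ List.replicate it.2.length (pvOv it.1)))
    (pvSortPos pawn_positions, List.replicate pawn_positions.length '0')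
  (r.1, if pawn_positions.length < r.2.length then some (String.ofList r.2) else none)

-- ===== PORT B =====
def reorder_pawn_positions_alt (pawn_positions : List (Int × String)) (promotions_by_piece : List (String × List (Int × String))) (is_white : Bool) : (List (Int × String)) × Option String :=
  let tagged0 := pawn_positions.map (fun pos => (("0" : String), pos))
  let tagged := (PySem.Dict.ofList promotions_by_piece).items.foldl
    (fun (acc : List (String × (Int × String))) it =>
      let digit := pvDigitS it.1
      if is_white == pvIsupper it.1 then acc ++ it.2.map (fun pos => (digit, pos)) else acc)
    tagged0
  -- three stable passes: by square string, then square number, then digit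
  let s1 := PySem.List.sorted tagged (fun t => t.2.2) false
  let s2 := PySem.List.sorted s1 (fun t => t.2.1) false
  let s3 := PySem.List.sorted s2 (fun t => t.1) false
  let key := PySem.Str.join "" (s3.map Prod.fst)
  (s3.map Prod.snd, if PySem.List.len pawn_positions < PySem.Str.len key then some key else none)

-- ===== PRECONDITION & SPEC =====
-- Pre_ excludes exactly the inputs on which Python A raises KeyError: some key whose
-- lowercase form is not one of the map keys "n","b","r","q" (B raises there as well).
def Pre_reorder_pawn_positions (pawn_positions : List (Int × String)) (promotions_by_piece : List (String × List (Int × String))) (is_white : Bool) : Prop :=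
  ∀ p ∈ promotions_by_piece, PySem.Str.lower p.1 ∈ (["n", "b", "r", "q"] : List String)
instance (pawn_positions : List (Int × String)) (promotions_by_piece : List (String × List (Int × String))) (is_white : Bool) : Decidable (Pre_reorder_pawn_positions pawn_positions promotions_by_piece is_white) := by unfold Pre_reorder_pawn_positions; infer_instance

def pvWitness_reorder_pawn_positions : (List (Int × String)) × (List (String × List (Int × String))) × Bool :=
  ([(0, "a")], [("N", [(1, "b")])], true)

def Spec_reorder_pawn_positions (pawn_positions : List (Int × String)) (promotions_by_piece : List (String × List (Int × String))) (is_white : Bool) (out : (List (Int × String)) × Option String) : Prop := out = reorder_pawn_positions_alt pawn_positions promotions_by_piece is_white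
instance (pawn_positions : List (Int × String)) (promotions_by_piece : List (String × List (Int × String))) (is_white : Bool) (out : (List (Int × String)) × Option String) : Decidable (Spec_reorder_pawn_positions pawn_positions promotions_by_piece is_white out) := by unfold Spec_reorder_pawn_positions; infer_instance

-- ===== CLAIM (what is proved, stated in full; the proofs are below) =====
def Claim_equal_reorder_pawn_positions : Prop := ∀ (pawn_positions : List (Int × String)) (promotions_by_piece : List (String × List (Int × String))) (is_white : Bool), Dom_reorder_pawn_positions pawn_positions promotions_by_piece is_white → Pre_reorder_pawn_positions pawn_positions promotions_by_piece is_white → Spec_reorder_pawn_positions pawn_positions promotions_by_piece is_white (reorder_pawn_positions pawn_positions promotions_by_piece is_white)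

-- ===== LEMMAS AND PROOFS =====

-- ASCII bounds of an uppercase character
theorem pvIsupper_bounds (c : Char) (h : PySem.Chars.isupper c = true) :
    65 ≤ c.toNat ∧ c.toNat ≤ 90 := by
  unfold PySem.Chars.isupper at h
  simp [Char.le_def, UInt32.le_iff_toNat_le] at h
  exact h

-- equal lowercase forms and equal case imply equal characters
theorem pvLowerChar_inj (c₁ c₂ : Char)
    (hu : PySem.Chars.isupper c₁ = PySem.Chars.isupper c₂)
    (hl : PySem.Chars.lowerChar c₁ = PySem.Chars.lowerChar c₂) : c₁ = c₂ := by
  unfold PySem.Chars.lowerChar at hl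
  cases hc : PySem.Chars.isupper c₁ with
  | false => rw [hc] at hl hu; rw [← hu] at hl; simpa using hl
  | true =>
    rw [hc] at hl hu; rw [← hu] at hl
    simp only [if_true] at hl
    obtain ⟨ha1, hb1⟩ := pvIsupper_bounds c₁ hc
    obtain ⟨ha2, hb2⟩ := pvIsupper_bounds c₂ hu.symm
    have v1 : Nat.isValidChar (c₁.toNat + 32) := Or.inl (by omega)
    have v2 : Nat.isValidChar (c₂.toNat + 32) := Or.inl (by omega)
    have heq := congrArg Char.toNat hl
    rw [Char.toNat_ofNat, Char.toNat_ofNat, if_pos v1, if_pos v2] at heq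
    have htn : c₁.toNat = c₂.toNat := by omega
    rw [← Char.ofNat_toNat c₁, ← Char.ofNat_toNat c₂, htn]

-- an uppercase ASCII character is not lowercase
theorem pvUpper_not_lower (c : Char) (h : PySem.Chars.isupper c = true) :
    PySem.Chars.islower c = false := by
  obtain ⟨h1, h2⟩ := pvIsupper_bounds c h
  unfold PySem.Chars.islower
  have : ¬ ('a' ≤ c) := by
    simp [Char.le_def, UInt32.le_iff_toNat_le]; omega
  simp [this]

-- on a single-character string, piece.isupper() is isupper of the character
theorem pvIsupper_single (s : String) (c : Char) (h : s.toList = [c]) :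
    pvIsupper s = PySem.Chars.isupper c := by
  unfold pvIsupper
  rw [h]
  cases hc : PySem.Chars.isupper c with
  | false => simp [hc]
  | true => simp [hc, pvUpper_not_lower c hc]

-- a string whose lowercase form is a single character is itself a single character
theorem pvSingle_of_lower (s : String) (x : Char)
    (h : PySem.Chars.lower s.toList = [x]) :
    ∃ c, s.toList = [c] ∧ PySem.Chars.lowerChar c = x := by
  unfold PySem.Chars.lower at h
  cases e : s.toList with
  | nil => rw [e] at h; simp at h
  | cons c t =>
    rw [e] at h
    simp only [List.map_cons, List.cons.injEq] at h
    obtain ⟨h1, h2⟩ := h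
    have ht : t = [] := List.map_eq_nil_iff.mp h2
    exact ⟨c, by rw [ht], h1⟩

-- a key with the same lowercase form (one of the four map keys) and the same case is the same key
theorem pvKey_eq (s₁ s₂ : String)
    (hl : PySem.Str.lower s₁ = PySem.Str.lower s₂)
    (hu : pvIsupper s₁ = pvIsupper s₂)
    (hm : PySem.Str.lower s₁ ∈ (["n", "b", "r", "q"] : List String)) : s₁ = s₂ := by
  have hc : PySem.Chars.lower s₁.toList = PySem.Chars.lower s₂.toList := by
    rw [← PySem.Str.toList_lower, ← PySem.Str.toList_lower, hl]
  have hx : ∃ x, PySem.Chars.lower s₁.toList = [x] := by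
    simp only [List.mem_cons, List.not_mem_nil, or_false] at hm
    rcases hm with h | h | h | h <;>
      exact ⟨_, by rw [← PySem.Str.toList_lower, h]; rfl⟩
  obtain ⟨x, hx⟩ := hx
  obtain ⟨c₁, he₁, hl₁⟩ := pvSingle_of_lower s₁ x hx
  obtain ⟨c₂, he₂, hl₂⟩ := pvSingle_of_lower s₂ x (by rw [← hc]; exact hx)
  rw [pvIsupper_single s₁ c₁ he₁, pvIsupper_single s₂ c₂ he₂] at hu
  have := pvLowerChar_inj c₁ c₂ hu (by rw [hl₁, hl₂])
  rw [← String.toList_inj, he₁, he₂, this]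

-- equal digits force equal lowercase keys (pvPmap is injective on its hits)
theorem pvOv_inj (s₁ s₂ : String)
    (h₁ : PySem.Str.lower s₁ ∈ (["n", "b", "r", "q"] : List String))
    (h₂ : PySem.Str.lower s₂ ∈ (["n", "b", "r", "q"] : List String))
    (h : pvOv s₁ = pvOv s₂) : PySem.Str.lower s₁ = PySem.Str.lower s₂ := by
  simp only [List.mem_cons, List.not_mem_nil, or_false] at h₁ h₂
  rcases h₁ with h₁ | h₁ | h₁ | h₁ <;> rcases h₂ with h₂ | h₂ | h₂ | h₂ <;>
    rw [h₁, h₂] <;> first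
      | rfl
      | (exfalso; simp [pvOv, pvPmap, h₁, h₂] at h)

-- the keys of a dict built from an association list are the distinct keys of that list
theorem pvKeys_ofList {κ ν : Type} [BEq κ] [LawfulBEq κ] (ps : List (κ × ν)) :
    (PySem.Dict.ofList ps).keys = PySem.Set.ofList (ps.map Prod.fst) := by
  show (List.foldl (fun acc p => acc.insert p.1 p.2) PySem.Dict.empty ps).keys = _
  rw [PySem.Dict.keys_foldl_insert_key ps Prod.fst (fun _ p => p.2) PySem.Dict.empty]
  rfl

-- ----- B-side machinery: the three stable passes sort by the lexicographic triple -----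

-- B's digit string is the singleton string of A's digit character
theorem pvDigitS_eq (s : String) : pvDigitS s = String.ofList [pvOv s] := by
  unfold pvDigitS pvOv pvPmapS pvPmap
  split_ifs <;> decide

-- sorted2 with the (fst, snd) tuple key is sorted with the lexicographic key
theorem pvSortPos_eq_sorted_lex (xs : List (Int × String)) :
    pvSortPos xs = PySem.List.sorted xs (fun p => toLex p) false := by
  have hcmp : (fun (a b : Int × String) =>
        decide (a.1 < b.1) || (!decide (b.1 < a.1) && decide (a.2 < b.2)))
      = fun a b => decide (toLex a < toLex b) := by
    funext a b
    rcases lt_trichotomy a.1 b.1 with h | h | h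
    · simp [Prod.Lex.lt_iff, h]
    · simp [Prod.Lex.lt_iff, h]
    · have h1 : ¬ a.1 < b.1 := lt_asymm h
      have h2 : a.1 ≠ b.1 := ne_of_gt h
      simp [Prod.Lex.lt_iff, h, h1, h2]
  rw [PySem.List.sorted_eq_foldl_insertBy]
  show xs.foldl (fun acc x => PySem.List.insertBy
    (fun a b => decide (a.1 < b.1) || (!decide (b.1 < a.1) && decide (a.2 < b.2))) x acc) [] = _
  rw [hcmp]

theorem pvSortPos_length (l : List (Int × String)) : (pvSortPos l).length = l.length :=
  (PySem.List.sorted2_perm l Prod.fst Prod.snd false).length_eq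

-- sorted(list of pairs) is pairwise lexicographically nondecreasing
theorem pvSortPos_pairwise (l : List (Int × String)) :
    (pvSortPos l).Pairwise (fun a b => a.1 < b.1 ∨ (a.1 = b.1 ∧ a.2 ≤ b.2)) := by
  rw [pvSortPos_eq_sorted_lex]
  exact (PySem.List.sorted_pairwise l (fun p : Int × String => toLex p)).imp
    (fun h => by simpa [Prod.Lex.le_iff] using h)

-- STABILITY: inserting x, which came after all of acc, keeps the "key-then-origin" invariant
theorem pvInsertBy_pairwise {α κ : Type} [LinearOrder κ] (key : α → κ) (R : α → α → Prop)
    (x : α) (acc : List α)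
    (hp : acc.Pairwise (fun a b => key a < key b ∨ (key a = key b ∧ R a b)))
    (hr : ∀ y ∈ acc, R y x) :
    (PySem.List.insertBy (fun a b => decide (key a < key b)) x acc).Pairwise
      (fun a b => key a < key b ∨ (key a = key b ∧ R a b)) := by
  induction acc with
  | nil => simp [PySem.List.insertBy]
  | cons y ys ih =>
    obtain ⟨hy, hys⟩ := List.pairwise_cons.mp hp
    by_cases h : key x < key y
    · have he : PySem.List.insertBy (fun a b => decide (key a < key b)) x (y :: ys)
          = x :: y :: ys := by simp [PySem.List.insertBy, h]
      rw [he]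
      refine List.pairwise_cons.mpr ⟨?_, hp⟩
      intro z hz
      rcases List.mem_cons.mp hz with rfl | hz
      · exact Or.inl h
      · rcases hy z hz with h' | ⟨h', _⟩
        · exact Or.inl (lt_trans h h')
        · exact Or.inl (h' ▸ h)
    · have he : PySem.List.insertBy (fun a b => decide (key a < key b)) x (y :: ys)
          = y :: PySem.List.insertBy (fun a b => decide (key a < key b)) x ys := by
        simp [PySem.List.insertBy, h]
      rw [he]
      refine List.pairwise_cons.mpr
        ⟨?_, ih hys (fun z hz => hr z (List.mem_cons_of_mem _ hz))⟩
      intro z hz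
      rcases (PySem.List.mem_insertBy _ _ _ _).mp hz with rfl | hz
      · rcases lt_or_eq_of_le (not_lt.mp h) with h' | h'
        · exact Or.inl h'
        · exact Or.inr ⟨h', hr y List.mem_cons_self⟩
      · exact hy z hz

theorem pvFoldl_insertBy_pairwise {α κ : Type} [LinearOrder κ] (key : α → κ) (R : α → α → Prop)
    (xs acc : List α)
    (hp : acc.Pairwise (fun a b => key a < key b ∨ (key a = key b ∧ R a b)))
    (hr : ∀ y ∈ acc, ∀ x ∈ xs, R y x) (hxs : xs.Pairwise R) :
    (xs.foldl (fun acc x => PySem.List.insertBy (fun a b => decide (key a < key b)) x acc)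
      acc).Pairwise (fun a b => key a < key b ∨ (key a = key b ∧ R a b)) := by
  induction xs generalizing acc with
  | nil => exact hp
  | cons x t ih =>
    obtain ⟨hx, ht⟩ := List.pairwise_cons.mp hxs
    refine ih _ (pvInsertBy_pairwise key R x acc hp (fun y hy => hr y hy x List.mem_cons_self))
      ?_ ht
    intro y hy z hz
    rcases (PySem.List.mem_insertBy _ _ _ _).mp hy with rfl | hy
    · exact hx z hz
    · exact hr y hy z (List.mem_cons_of_mem _ hz)

-- a stable sort refines any pairwise invariant of its input inside key ties
theorem pvSorted_pairwise_stable {α κ : Type} [LinearOrder κ] (xs : List α) (key : α → κ)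
    (R : α → α → Prop) (h : xs.Pairwise R) :
    (PySem.List.sorted xs key false).Pairwise
      (fun a b => key a < key b ∨ (key a = key b ∧ R a b)) := by
  rw [PySem.List.sorted_eq_foldl_insertBy]
  exact pvFoldl_insertBy_pairwise key R xs [] (by simp) (by simp) h

-- the full lexicographic order after the three passes
def pvP (t u : String × (Int × String)) : Prop :=
  t.1 < u.1 ∨ (t.1 = u.1 ∧ (t.2.1 < u.2.1 ∨ (t.2.1 = u.2.1 ∧ t.2.2 ≤ u.2.2)))

def pvKey3 (t : String × (Int × String)) : Lex (String × Lex (Int × String)) :=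
  toLex (t.1, toLex t.2)

theorem pvP_le (t u : String × (Int × String)) (h : pvP t u) : pvKey3 t ≤ pvKey3 u := by
  unfold pvP at h; unfold pvKey3
  rw [Prod.Lex.le_iff]; simp only [ofLex_toLex]
  rcases h with h | ⟨h1, h2⟩
  · exact Or.inl h
  · refine Or.inr ⟨h1, ?_⟩
    rw [Prod.Lex.le_iff]; simp only [ofLex_toLex]
    exact h2

theorem pvKey3_inj : Function.Injective pvKey3 := by
  intro a b h
  unfold pvKey3 at h
  rw [toLex_inj, Prod.mk.injEq, toLex_inj] at h
  exact Prod.ext h.1 h.2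

-- digit strings of admitted keys and their order
theorem pvDigitS_lt (s t : String)
    (hs : PySem.Str.lower s ∈ (["n", "b", "r", "q"] : List String))
    (ht : PySem.Str.lower t ∈ (["n", "b", "r", "q"] : List String))
    (h : pvOv s < pvOv t) : pvDigitS s < pvDigitS t := by
  simp only [List.mem_cons, List.not_mem_nil, or_false] at hs ht
  rcases hs with hs | hs | hs | hs <;> rcases ht with ht | ht | ht | ht <;>
    first
      | (exfalso; revert h; simp [pvOv, pvPmap, hs, ht]; done)
      | (simp [pvDigitS, pvPmapS, hs, ht]; decide)

theorem pvZero_lt_digitS (s : String)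
    (hs : PySem.Str.lower s ∈ (["n", "b", "r", "q"] : List String)) :
    ("0" : String) < pvDigitS s := by
  simp only [List.mem_cons, List.not_mem_nil, or_false] at hs
  rcases hs with hs | hs | hs | hs <;> (simp [pvDigitS, pvPmapS, hs]; decide)

-- "".join over singleton strings rebuilds the character list
theorem pvIntercalate_nil (L : List (List Char)) : List.intercalate [] L = L.flatten := by
  simp only [List.intercalate]
  induction L with
  | nil => simp
  | cons x t ih => cases t <;> simp_all [List.intersperse]

theorem pvJoin_singletons (cs : List Char) :
    PySem.Str.join "" (cs.map (fun c => String.ofList [c])) = String.ofList cs := by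
  unfold PySem.Str.join
  unfold PySem.Chars.join
  have h0 : ("" : String).toList = [] := rfl
  rw [h0, List.map_map]
  have h1 : (String.toList ∘ fun c => String.ofList [c]) = fun c => [c] := by
    funext c; simp [String.toList_ofList]
  rw [h1, pvIntercalate_nil, ← List.flatMap_def]
  simp

-- ===== MAIN PROOF =====
theorem pvMain (pawn : List (Int × String)) (promos : List (String × List (Int × String))) (iw : Bool)
    (hpre : ∀ p ∈ promos, PySem.Str.lower p.1 ∈ (["n", "b", "r", "q"] : List String)) :
    reorder_pawn_positions pawn promos iw = reorder_pawn_positions_alt pawn promos iw := by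
  simp only [reorder_pawn_positions, reorder_pawn_positions_alt]
  set L := (PySem.Dict.ofList promos).items with hLdef
  -- every key of the dict satisfies the precondition
  have hL4 : ∀ it ∈ L, PySem.Str.lower it.1 ∈ (["n", "b", "r", "q"] : List String) := by
    intro it hit
    have hk : it.1 ∈ (PySem.Dict.ofList promos).keys := List.mem_map_of_mem hit
    rw [pvKeys_ofList] at hk
    obtain ⟨p, hp, hpe⟩ := List.mem_map.mp ((PySem.Set.mem_ofList _ _).mp hk)
    rw [← hpe]
    exact hpre p hp
  have hnodupKeys : (L.map Prod.fst).Nodup := PySem.Dict.nodup_keys_ofList promos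
  have hLnodup : L.Nodup := List.Nodup.of_map _ hnodupKeys
  -- the two filter tests coincide (A skips, B keeps)
  set pred := fun it : String × List (Int × String) => iw == pvIsupper it.1 with hpreddef
  set F0 := L.filter pred with hF0def
  set S := PySem.List.sorted L (fun x => pvOv x.1) false with hSdef
  set F := S.filter pred with hFdef
  have hperm : F.Perm F0 := List.Perm.filter pred (PySem.List.sorted_perm L _ false)
  -- at most one survivor per digit
  have huniq : ∀ a ∈ F0, ∀ b ∈ F0, pvOv a.1 = pvOv b.1 → a = b := by
    intro a ha b hb hov
    obtain ⟨haL, hca⟩ := List.mem_filter.mp ha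
    obtain ⟨hbL, hcb⟩ := List.mem_filter.mp hb
    have hla := hL4 a haL
    have hlb := hL4 b hbL
    have hll := pvOv_inj a.1 b.1 hla hlb hov
    have hua : iw = pvIsupper a.1 := eq_of_beq hca
    have hub : iw = pvIsupper b.1 := eq_of_beq hcb
    have hkey : a.1 = b.1 := pvKey_eq a.1 b.1 hll (by rw [← hua, ← hub]) hla
    exact List.inj_on_of_nodup_map hnodupKeys haL hbL hkey
  have hF0nodupMap : (F0.map (fun it => pvOv it.1)).Nodup :=
    List.Nodup.map_on huniq (hLnodup.filter pred)
  have hFnodupMap : (F.map (fun it => pvOv it.1)).Nodup :=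
    ((hperm.map _).nodup_iff).mpr hF0nodupMap
  have hFstrict : F.Pairwise (fun a b => pvOv a.1 < pvOv b.1) := by
    have h1 : F.Pairwise (fun a b => pvOv a.1 ≤ pvOv b.1) :=
      List.Pairwise.sublist (List.filter_sublist) (PySem.List.sorted_pairwise L (fun x => pvOv x.1))
    have h2 : F.Pairwise (fun a b => pvOv a.1 ≠ pvOv b.1) := List.pairwise_map.mp hFnodupMap
    exact (h1.and h2).imp (fun h => lt_of_le_of_ne h.1 h.2)
  have hFsubL : ∀ it ∈ F, it ∈ L := by
    intro it hit
    exact (PySem.List.mem_sorted L _ false it).mp (List.mem_filter.mp hit).1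
  -- ---------- A's fold ----------
  have hskip : (fun (acc : List (Int × String) × List Char) (it : String × List (Int × String)) =>
      if iw != pvIsupper it.1 then acc
      else (acc.1 ++ pvSortPos it.2, acc.2 ++ List.replicate it.2.length (pvOv it.1)))
      = (fun acc it => if pred it
          then (acc.1 ++ pvSortPos it.2, acc.2 ++ List.replicate it.2.length (pvOv it.1))
          else acc) := by
    funext acc it
    by_cases h : iw == pvIsupper it.1 <;> simp [bne, hpreddef, h]
  have hA : S.foldl
      (fun (acc : List (Int × String) × List Char) it =>
        if iw != pvIsupper it.1 then acc
        else (acc.1 ++ pvSortPos it.2, acc.2 ++ List.replicate it.2.length (pvOv it.1)))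
      (pvSortPos pawn, List.replicate pawn.length '0')
      = (pvSortPos pawn ++ F.flatMap (fun it => pvSortPos it.2),
         List.replicate pawn.length '0'
           ++ F.flatMap (fun it => List.replicate it.2.length (pvOv it.1))) := by
    rw [hskip, PySem.List.foldl_if_eq_foldl_filter pred
      (fun (acc : List (Int × String) × List Char) it =>
        (acc.1 ++ pvSortPos it.2, acc.2 ++ List.replicate it.2.length (pvOv it.1)))]
    rw [PySem.List.foldl_prod_mk
      (fun (a : List (Int × String)) (e : String × List (Int × String)) => a ++ pvSortPos e.2)
      (fun (b : List Char) (e : String × List (Int × String)) =>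
        b ++ List.replicate e.2.length (pvOv e.1))]
    rw [PySem.List.foldl_append_eq_flatMap, PySem.List.foldl_append_eq_flatMap]
  -- ---------- B's tagged list ----------
  have htagged : L.foldl
      (fun (acc : List (String × (Int × String))) it =>
        let digit := pvDigitS it.1
        if iw == pvIsupper it.1 then acc ++ it.2.map (fun pos => (digit, pos)) else acc)
      (pawn.map (fun pos => (("0" : String), pos)))
      = pawn.map (fun pos => (("0" : String), pos))
        ++ F0.flatMap (fun it => it.2.map (fun pos => (pvDigitS it.1, pos))) := by
    rw [show (fun (acc : List (String × (Int × String))) (it : String × List (Int × String)) =>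
        let digit := pvDigitS it.1
        if iw == pvIsupper it.1 then acc ++ it.2.map (fun pos => (digit, pos)) else acc)
      = (fun acc it => if pred it
          then acc ++ it.2.map (fun pos => (pvDigitS it.1, pos)) else acc) from rfl]
    rw [PySem.List.foldl_if_eq_foldl_filter pred
      (fun (acc : List (String × (Int × String))) it =>
        acc ++ it.2.map (fun pos => (pvDigitS it.1, pos)))]
    rw [PySem.List.foldl_append_eq_flatMap]
  -- the canonical ordered tagged list
  set C := (pvSortPos pawn).map (fun p => (("0" : String), p))
      ++ F.flatMap (fun it => (pvSortPos it.2).map (fun p => (pvDigitS it.1, p))) with hCdef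
  -- the raw tagged list is a rearrangement of C
  have hTC : (pawn.map (fun pos => (("0" : String), pos))
      ++ F0.flatMap (fun it => it.2.map (fun pos => (pvDigitS it.1, pos)))).Perm C := by
    refine List.Perm.append ?_ ?_
    · exact (List.Perm.map _ (PySem.List.sorted2_perm pawn Prod.fst Prod.snd false)).symm
    · exact List.Perm.flatMap hperm.symm
        (fun a _ => (List.Perm.map _ (PySem.List.sorted2_perm a.2 Prod.fst Prod.snd false)).symm)
  -- C is pairwise nondecreasing for the full lexicographic order
  have hCP : C.Pairwise pvP := by
    rw [hCdef, List.pairwise_append]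
    refine ⟨?_, ?_, ?_⟩
    · rw [List.pairwise_map]
      exact (pvSortPos_pairwise pawn).imp (fun h => Or.inr ⟨rfl, h⟩)
    · rw [List.flatMap_def, List.pairwise_flatten]
      constructor
      · intro l hl
        obtain ⟨it, _, rfl⟩ := List.mem_map.mp hl
        rw [List.pairwise_map]
        exact (pvSortPos_pairwise it.2).imp (fun h => Or.inr ⟨rfl, h⟩)
      · rw [List.pairwise_map]
        refine hFstrict.imp_of_mem ?_
        intro a b ha hb hlt x hx y hy
        obtain ⟨_, _, rfl⟩ := List.mem_map.mp hx
        obtain ⟨_, _, rfl⟩ := List.mem_map.mp hy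
        exact Or.inl (pvDigitS_lt a.1 b.1 (hL4 a (hFsubL a ha)) (hL4 b (hFsubL b hb)) hlt)
    · intro a ha b hb
      obtain ⟨_, _, rfl⟩ := List.mem_map.mp ha
      obtain ⟨it, hit, hb2⟩ := List.mem_flatMap.mp hb
      obtain ⟨_, _, rfl⟩ := List.mem_map.mp hb2
      exact Or.inl (pvZero_lt_digitS it.1 (hL4 it (hFsubL it hit)))
  -- the three passes land exactly on C
  set T := pawn.map (fun pos => (("0" : String), pos))
      ++ F0.flatMap (fun it => it.2.map (fun pos => (pvDigitS it.1, pos))) with hTdef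
  set s1 := PySem.List.sorted T (fun t => t.2.2) false with hs1def
  set s2 := PySem.List.sorted s1 (fun t => t.2.1) false with hs2def
  set s3 := PySem.List.sorted s2 (fun t => t.1) false with hs3def
  have hs3C : s3 = C := by
    have hperm3 : s3.Perm C :=
      ((PySem.List.sorted_perm s2 _ false).trans
        ((PySem.List.sorted_perm s1 _ false).trans
          (PySem.List.sorted_perm T _ false))).trans hTC
    have hp1 := PySem.List.sorted_pairwise T (fun t => t.2.2)
    have hp2 := pvSorted_pairwise_stable s1 (fun t => t.2.1) _ hp1
    have hp3 := pvSorted_pairwise_stable s2 (fun t => t.1) _ hp2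
    exact PySem.List.eq_of_perm_of_pairwise_le_of_injective pvKey3 pvKey3_inj hperm3
      (hp3.imp (fun h => pvP_le _ _ h)) (hCP.imp (fun h => pvP_le _ _ h))
  -- unzip C
  have hmapsnd : C.map Prod.snd
      = pvSortPos pawn ++ F.flatMap (fun it => pvSortPos it.2) := by
    rw [hCdef]
    simp [List.map_flatMap, List.map_map]
  have hmapfst : C.map Prod.fst
      = (List.replicate pawn.length '0'
          ++ F.flatMap (fun it => List.replicate it.2.length (pvOv it.1))).map
          (fun c => String.ofList [c]) := by
    rw [hCdef]
    simp only [List.map_append, List.map_flatMap, List.map_map, List.map_replicate]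
    congr 1
    · rw [show (Prod.fst ∘ fun p : Int × String => (("0" : String), p))
          = (fun _ : Int × String => ("0" : String)) from rfl]
      rw [List.map_const', pvSortPos_length]
    · congr 1
      funext it
      rw [show (Prod.fst ∘ fun p : Int × String => (pvDigitS it.1, p))
          = (fun _ : Int × String => pvDigitS it.1) from rfl]
      rw [List.map_const', pvSortPos_length, pvDigitS_eq]
  -- assemble both sides
  rw [hA, htagged]
  rw [show (PySem.List.sorted
      (PySem.List.sorted (PySem.List.sorted T (fun t => t.2.2) false) (fun t => t.2.1) false)
      (fun t => t.1) false) = s3 from rfl, hs3C]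
  rw [hmapsnd, hmapfst, pvJoin_singletons]
  rw [PySem.List.len_eq, PySem.Str.len_eq, String.toList_ofList]
  simp [-Nat.cast_list_sum, -List.map_map]

-- ===== VERDICT (by name: the statement is the Claim_ definition above) =====
theorem reorder_pawn_positions_spec : Claim_equal_reorder_pawn_positions := by
  intro pawn promos iw _ hpre
  unfold Spec_reorder_pawn_positions
  exact pvMain pawn promos iw hpre
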